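-- pv_equiv track=rewrite | github.com/ArchAstro/archagents | scripts/check_plugin_repo.py | _iter_scannable_lines
-- ===== SOURCE A (Python) =====
-- from typing import Callable, Iterable, Iterator
--
-- def _iter_scannable_lines(text: str) -> Iterator[tuple[int, str]]:
--     """
--     Yield (1-based lineno, line) pairs from markdown text, skipping YAML
--     frontmatter at the top of the file and lines inside fenced code blocks.
--     Both fence delimiters and frontmatter delimiters are consumed but not
--     yielded.
--     """
--     lines = text.splitlines()
--     i = 0
--     n = len(lines)
--
--     # Frontmatter: if the first line is `---` alone, consume until the
--     # next `---`. A file without frontmatter starts scanning at line 1.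
--     if n > 0 and lines[0].strip() == "---":
--         i = 1
--         while i < n and lines[i].strip() != "---":
--             i += 1
--         i += 1  # consume the closing ---
--
--     in_fence = False
--     while i < n:
--         stripped = lines[i].lstrip()
--         # Markdown fences may use either ``` or ~~~ as delimiters.
--         if stripped.startswith("```") or stripped.startswith("~~~"):
--             in_fence = not in_fence
--         elif not in_fence:
--             yield (i + 1, lines[i])
--         i += 1
-- ===== SOURCE B (Python) =====
-- def _iter_scannable_lines(text):
--     """Staged-pass version: (1) compute the body start index past any YAML
--     frontmatter, (2) precompute a fence-delimiter mask and an exclusive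
--     prefix-parity array over the body, (3) yield the lines selected by the
--     two arrays."""
--     lines = text.splitlines()
--     start = 0
--     if lines and lines[0].strip() == "---":
--         start = len(lines) + 1          # unterminated frontmatter eats the file
--         for j in range(1, len(lines)):
--             if lines[j].strip() == "---":
--                 start = j + 1
--                 break
--     body = lines[start:]
--     is_delim = [line.lstrip()[:3] in ("```", "~~~") for line in body]
--     inside = []                          # exclusive prefix XOR of is_delim
--     p = False
--     for d in is_delim:
--         inside.append(p)
--         p ^= d
--     for k, (line, d, ins) in enumerate(zip(body, is_delim, inside)):
--         if not d and not ins: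
--             yield (start + k + 1, line)
-- ===== Notes on version B (the rewrite author's own statement) =====
-- stated objective: alternative
-- what changed: Instead of A's stateful sequential scan (frontmatter while-loop, then a loop carrying an in_fence flag), B works in staged passes: it computes the body start index by searching for the closing frontmatter delimiter, precomputes a fence-delimiter mask and an exclusive prefix-XOR parity array over the body, and then selects the yielded lines purely from those two arrays.
import Mathlib
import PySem

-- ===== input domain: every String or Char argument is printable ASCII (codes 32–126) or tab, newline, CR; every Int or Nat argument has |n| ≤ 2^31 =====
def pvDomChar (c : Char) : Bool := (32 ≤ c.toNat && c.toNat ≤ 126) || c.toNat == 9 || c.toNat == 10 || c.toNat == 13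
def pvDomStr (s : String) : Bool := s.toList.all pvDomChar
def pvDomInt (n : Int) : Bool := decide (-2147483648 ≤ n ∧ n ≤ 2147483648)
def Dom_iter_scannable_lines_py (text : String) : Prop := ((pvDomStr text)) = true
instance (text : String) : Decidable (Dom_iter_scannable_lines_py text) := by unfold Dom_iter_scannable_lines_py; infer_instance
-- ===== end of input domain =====

set_option maxRecDepth 4000

-- B replaces A's stateful two-loop scan by staged passes: find the body start,
-- precompute a fence-delimiter mask and an exclusive prefix-parity array, then
-- select lines by the two arrays (objective: alternative decomposition, same cost).

-- ===== PORT A =====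
-- the frontmatter while-loop: advance i past lines until (and including) a stripped "---"
def aSkipFm : List String → Nat → List String × Nat
  | [], i => ([], i + 1)
  | l :: rest, i =>
    if PySem.Str.strip l = "---" then (rest, i + 1) else aSkipFm rest (i + 1)

-- the main while-loop: remaining lines, current index i, in_fence flag
def aLoop : List String → Nat → Bool → List (Int × String)
  | [], _, _ => []
  | l :: rest, i, f =>
    let stripped := PySem.Str.lstrip l
    if PySem.Str.startswith stripped "```" || PySem.Str.startswith stripped "~~~" then
      aLoop rest (i + 1) (!f)
    else if !f then ((i : Int) + 1, l) :: aLoop rest (i + 1) f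
    else aLoop rest (i + 1) f

def iter_scannable_lines_py (text : String) : List (Int × String) :=
  let lines := PySem.Str.splitlines text
  match lines with
  | [] => []
  | l0 :: rest =>
    if PySem.Str.strip l0 = "---" then
      let p := aSkipFm rest 1
      aLoop p.1 p.2 false
    else
      aLoop lines 0 false

-- ===== PORT B =====
-- the `for j in range(1, len(lines))`-with-break search for the closing "---";
-- `default` is the pre-set `start = len(lines) + 1`
def bFindClose : List String → Nat → Nat → Nat
  | [], _, default => default
  | l :: rest, j, default =>
    if PySem.Str.strip l = "---" then j + 1 else bFindClose rest (j + 1) default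

-- line.lstrip()[:3] in ("```", "~~~")
def bDelim (line : String) : Bool :=
  let t3 := PySem.Chars.slice (PySem.Chars.lstrip line.toList) none (some 3)
  t3 = "```".toList || t3 = "~~~".toList

-- the prefix-parity loop: inside.append(p); p ^= d
def bInside : List Bool → Bool → List Bool
  | [], _ => []
  | d :: ds, p => p :: bInside ds (p ^^ d)

-- the final enumerate(zip(body, is_delim, inside)) loop
def bEmit (start : Int) : List (String × Bool × Bool) → Int → List (Int × String)
  | [], _ => []
  | (line, d, ins) :: rest, k =>
    if !d && !ins then (start + k + 1, line) :: bEmit start rest (k + 1)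
    else bEmit start rest (k + 1)

def iter_scannable_lines_py_alt (text : String) : List (Int × String) :=
  let lines := PySem.Str.splitlines text
  let start : Nat :=
    match lines with
    | l0 :: rest =>
      if PySem.Str.strip l0 = "---" then bFindClose rest 1 (lines.length + 1) else 0
    | [] => 0
  let body := lines.drop start        -- lines[start:] with 0 ≤ start (exact: Python clamps past the end, so does drop)
  let is_delim := body.map bDelim
  let inside := bInside is_delim false
  bEmit (start : Int) (body.zip (is_delim.zip inside)) 0

-- ===== PRECONDITION & SPEC =====
def Spec_iter_scannable_lines_py (text : String) (out : List (Int × String)) : Prop := out = iter_scannable_lines_py_alt text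
instance (text : String) (out : List (Int × String)) : Decidable (Spec_iter_scannable_lines_py text out) := by unfold Spec_iter_scannable_lines_py; infer_instance

-- ===== CLAIM =====
def Claim_equal_iter_scannable_lines_py : Prop := ∀ (text : String), Dom_iter_scannable_lines_py text → Spec_iter_scannable_lines_py text (iter_scannable_lines_py text)

-- ===== LEMMAS AND PROOFS =====

-- A's fence test agrees with B's take-3 test
lemma delim_eq (l : String) :
    bDelim l = (PySem.Str.startswith (PySem.Str.lstrip l) "```" ||
                PySem.Str.startswith (PySem.Str.lstrip l) "~~~") := by
  have hsl : PySem.Chars.slice (PySem.Chars.lstrip l.toList) none (some 3) =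
      (PySem.Chars.lstrip l.toList).take 3 := by
    rw [PySem.Chars.slice_eq_listSlice, PySem.List.slice_to _ (by norm_num)]; rfl
  have htake : ∀ (xs p : List Char), p.length = 3 → ((xs.take 3 = p) ↔ p <+: xs) := by
    intro xs p hp
    constructor
    · intro h; rw [← h]; exact List.take_prefix 3 xs
    · intro h; have h2 := List.prefix_iff_eq_take.mp h; rw [hp] at h2; exact h2.symm
  rw [Bool.eq_iff_iff]
  simp only [bDelim, hsl, Bool.or_eq_true, decide_eq_true_eq, PySem.Str.startswith_eq,
    PySem.Str.toList_lstrip, PySem.Chars.startswith_iff]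
  exact or_congr (htake _ _ (by decide)) (htake _ _ (by decide))

-- A's main loop is B's emit over the precomputed arrays
lemma scan_eq (s : Int) : ∀ (ls : List String) (p : Bool) (i : Nat) (k : Int), s + k = (i : Int) →
    aLoop ls i p = bEmit s (ls.zip ((ls.map bDelim).zip (bInside (ls.map bDelim) p))) k := by
  intro ls
  induction ls with
  | nil => intro p i k _; simp [aLoop, bEmit]
  | cons l rest ih =>
    intro p i k hk
    have hd := delim_eq l
    simp only [List.map_cons, bInside, List.zip_cons_cons]
    cases hD : (PySem.Chars.startswith (PySem.Chars.lstrip l.toList) ['`', '`', '`'] ||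
        PySem.Chars.startswith (PySem.Chars.lstrip l.toList) ['~', '~', '~']) with
    | true =>
      have hb : bDelim l = true := by
        rw [hd]; simp only [PySem.Str.startswith_eq, PySem.Str.toList_lstrip]; exact hD
      have hih := ih (!p) (i + 1) (k + 1) (by push_cast; omega)
      rcases (by simpa using hD :
          PySem.Chars.startswith (PySem.Chars.lstrip l.toList) ['`', '`', '`'] = true ∨
          PySem.Chars.startswith (PySem.Chars.lstrip l.toList) ['~', '~', '~'] = true) with h1 | h1 <;>
        simp [aLoop, h1, hb, bEmit, hih]
    | false =>
      have hb : bDelim l = false := by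
        rw [hd]; simp only [PySem.Str.startswith_eq, PySem.Str.toList_lstrip]; exact hD
      obtain ⟨h1, h2⟩ := Bool.or_eq_false_iff.mp hD
      cases p with
      | false =>
        have hih := ih false (i + 1) (k + 1) (by push_cast; omega)
        simp [aLoop, h1, h2, hb, bEmit, hih]
        omega
      | true =>
        have hih := ih true (i + 1) (k + 1) (by push_cast; omega)
        simp [aLoop, h1, h2, hb, bEmit, hih]

-- bFindClose either fails (returns its default) or returns a found index + 1 past its start
lemma bFindClose_cases : ∀ (rs : List String) (j d : Nat),
    bFindClose rs j d = d ∨ j + 1 ≤ bFindClose rs j d := by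
  intro rs
  induction rs with
  | nil => intro j d; left; rfl
  | cons a as ih =>
    intro j d
    simp only [bFindClose]
    split
    · right; omega
    · rcases ih (j + 1) d with h | h
      · left; exact h
      · right; omega

-- A's frontmatter loop is B's closing-delimiter search
lemma fm_eq : ∀ (rest : List String) (j : Nat),
    aSkipFm rest j = (rest.drop (bFindClose rest j (j + rest.length + 1) - j),
                      bFindClose rest j (j + rest.length + 1)) := by
  intro rest
  induction rest with
  | nil => intro j; simp [aSkipFm, bFindClose]
  | cons l rs ih =>
    intro j
    by_cases hm : PySem.Str.strip l = "---"
    · simp [aSkipFm, bFindClose, hm]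
    · have hge : j + 1 ≤ bFindClose rs (j + 1) (j + (rs.length + 1) + 1) := by
        rcases bFindClose_cases rs (j + 1) (j + (rs.length + 1) + 1) with h | h <;> omega
      have := ih (j + 1)
      rw [show j + 1 + rs.length + 1 = j + (rs.length + 1) + 1 by omega] at this
      simp only [aSkipFm, bFindClose, hm, if_false, List.length_cons]
      rw [this]
      rw [show bFindClose rs (j + 1) (j + (rs.length + 1) + 1) - j =
          (bFindClose rs (j + 1) (j + (rs.length + 1) + 1) - (j + 1)) + 1 by omega,
        List.drop_succ_cons]

theorem main_eq (text : String) :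
    iter_scannable_lines_py text = iter_scannable_lines_py_alt text := by
  unfold iter_scannable_lines_py iter_scannable_lines_py_alt
  cases hls : PySem.Str.splitlines text with
  | nil => simp [bEmit]
  | cons l0 rest =>
    by_cases hm : PySem.Str.strip l0 = "---"
    · simp only [hm, if_pos, List.length_cons]
      rw [show rest.length + 1 + 1 = 1 + rest.length + 1 by omega]
      rw [fm_eq rest 1]
      have hge : 1 ≤ bFindClose rest 1 (1 + rest.length + 1) := by
        rcases bFindClose_cases rest 1 (1 + rest.length + 1) with h | h <;> omega
      rw [show (l0 :: rest).drop (bFindClose rest 1 (1 + rest.length + 1)) =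
          rest.drop (bFindClose rest 1 (1 + rest.length + 1) - 1) from by
        rw [show bFindClose rest 1 (1 + rest.length + 1) =
            (bFindClose rest 1 (1 + rest.length + 1) - 1) + 1 by omega, List.drop_succ_cons,
          Nat.add_sub_cancel]]
      exact scan_eq _ _ false _ 0 (by omega)
    · simp only [hm, if_false]
      exact scan_eq 0 (l0 :: rest) false 0 0 (by omega)

-- ===== VERDICT =====
theorem iter_scannable_lines_py_spec : Claim_equal_iter_scannable_lines_py := by
  intro text _
  unfold Spec_iter_scannable_lines_py
  exact main_eq text
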